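-- pv_equiv track=rewrite | github.com/tnnrhpwd/MX5-Telemetry | tools/LED_Simulator/led_simulator_v2.1.py | get_error_pattern
-- ===== SOURCE A (Python) =====
-- LED_COUNT = 30  # Fixed hardware constant
--
-- ERROR_COLOR = (255, 0, 0)
--
-- def get_error_pattern(pepper_position):
--     """
--     Error State: CAN Error - Red pepper inward from edges.
--     Returns list of RGB tuples for all LEDs.
--     """
--     pattern = []
--     for i in range(LED_COUNT):
--         distance_from_edge = min(i, LED_COUNT - 1 - i)
--
--         if distance_from_edge <= pepper_position and pepper_position < (LED_COUNT // 2):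
--             # Light up this LED with red
--             pattern.append(ERROR_COLOR)
--         else:
--             pattern.append((0, 0, 0))
--
--     return pattern
-- ===== SOURCE B (Python) =====
-- LED_COUNT = 30  # Fixed hardware constant
--
-- ERROR_COLOR = (255, 0, 0)
--
-- def get_error_pattern(pepper_position):
--     """
--     Error State: CAN Error - Red pepper inward from edges.
--     Returns list of RGB tuples for all LEDs.
--     """
--     pattern = [(0, 0, 0)] * LED_COUNT
--     if pepper_position >= LED_COUNT // 2:
--         return pattern
--     n = max(0, min(LED_COUNT // 2, pepper_position + 1))
--     for i in range(n):
--         pattern[i] = ERROR_COLOR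
--         pattern[LED_COUNT - 1 - i] = ERROR_COLOR
--     return pattern
-- ===== Notes on version B (the rewrite author's own statement) =====
-- stated objective: simpler
-- what changed: Replaces the per-LED minimum-distance scan over the whole strip with a count-driven two-ended fill: the half-strip gate is checked once, the number of lit LEDs per edge is computed in closed form, and only those positions are written into a pre-built all-black list.
import Mathlib
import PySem

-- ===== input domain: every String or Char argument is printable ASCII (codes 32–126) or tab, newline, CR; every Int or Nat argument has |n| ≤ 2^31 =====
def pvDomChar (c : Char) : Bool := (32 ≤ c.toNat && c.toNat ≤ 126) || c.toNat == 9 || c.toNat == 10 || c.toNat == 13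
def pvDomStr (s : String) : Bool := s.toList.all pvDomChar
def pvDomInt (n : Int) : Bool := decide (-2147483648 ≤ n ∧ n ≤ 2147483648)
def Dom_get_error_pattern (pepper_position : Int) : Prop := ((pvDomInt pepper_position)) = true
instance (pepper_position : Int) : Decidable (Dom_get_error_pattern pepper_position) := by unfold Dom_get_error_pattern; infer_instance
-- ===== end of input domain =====

-- ===== PORT A =====
-- Port of A: per-LED scan appending red when min-distance-from-edge ≤ pepper_position (and gate p < 30//2).
def get_error_pattern (pepper_position : Int) : List (Int × Int × Int) :=
  (PySem.List.pyRange 0 30 1).foldl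
    (fun pattern i =>
      let distance_from_edge := min i (30 - 1 - i)
      if distance_from_edge ≤ pepper_position ∧ pepper_position < PySem.Int.floordiv 30 2 then
        pattern ++ [(255, 0, 0)]
      else
        pattern ++ [(0, 0, 0)])
    []

-- ===== PORT B =====
-- Port of B: all-black list, one gate check, then a count-driven two-ended fill.
-- (indices i and 30-1-i are nonnegative for i in range(n), n ≤ 15, so .toNat is exact here)
def get_error_pattern_alt (pepper_position : Int) : List (Int × Int × Int) :=
  let pattern := List.replicate 30 ((0 : Int), (0 : Int), (0 : Int))
  if pepper_position ≥ PySem.Int.floordiv 30 2 then pattern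
  else
    (PySem.List.pyRange 0 (max 0 (min (PySem.Int.floordiv 30 2) (pepper_position + 1))) 1).foldl
      (fun pat i => (pat.set i.toNat (255, 0, 0)).set (30 - 1 - i).toNat (255, 0, 0))
      pattern

-- ===== PRECONDITION & SPEC =====
def Spec_get_error_pattern (pepper_position : Int) (out : List (Int × Int × Int)) : Prop := out = get_error_pattern_alt pepper_position
instance (pepper_position : Int) (out : List (Int × Int × Int)) : Decidable (Spec_get_error_pattern pepper_position out) := by unfold Spec_get_error_pattern; infer_instance

-- ===== CLAIM (what is proved, stated in full; the proofs are below) =====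
def Claim_equal_get_error_pattern : Prop := ∀ (pepper_position : Int), Dom_get_error_pattern pepper_position → Spec_get_error_pattern pepper_position (get_error_pattern pepper_position)

-- ===== LEMMAS AND PROOFS =====

-- A's fold body, named for the lemmas below (definitionally the lambda in the port).
def pvStepA (p : Int) (pattern : List (Int × Int × Int)) (i : Int) : List (Int × Int × Int) :=
  let distance_from_edge := min i (30 - 1 - i)
  if distance_from_edge ≤ p ∧ p < PySem.Int.floordiv 30 2 then
    pattern ++ [(255, 0, 0)]
  else
    pattern ++ [(0, 0, 0)]

theorem pvFoldA_black (p : Int) (l : List Int)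
    (h : ∀ i ∈ l, ¬ (min i (30 - 1 - i) ≤ p ∧ p < PySem.Int.floordiv 30 2)) :
    ∀ acc, l.foldl (pvStepA p) acc = acc ++ List.replicate l.length ((0:Int),(0:Int),(0:Int)) := by
  induction l with
  | nil => intro acc; simp
  | cons x xs ih =>
    intro acc
    simp only [List.foldl_cons, List.length_cons]
    rw [ih (fun i hi => h i (List.mem_cons_of_mem x hi))]
    have hx := h x (List.mem_cons_self)
    simp only [pvStepA, if_neg hx]
    rw [List.replicate_succ]
    simp

theorem pvA_eq_fold (p : Int) :
    get_error_pattern p = (PySem.List.pyRange 0 30 1).foldl (pvStepA p) [] := rfl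



-- ===== VERDICT (by name: the statement is the Claim_ definition above) =====
theorem get_error_pattern_spec : Claim_equal_get_error_pattern := by
  intro p _
  unfold Spec_get_error_pattern
  have hd : PySem.Int.floordiv 30 2 = 15 := by decide
  have hlen : (PySem.List.pyRange 0 30 1).length = 30 := by decide
  by_cases hlt : p < 15
  · by_cases h0 : 0 ≤ p
    · interval_cases p <;> decide
    · -- p < 0: both sides are the all-black list
      have hA : get_error_pattern p = List.replicate 30 ((0:Int),(0:Int),(0:Int)) := by
        rw [pvA_eq_fold, pvFoldA_black, hlen]
        · simp
        · intro i hi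
          have := (PySem.List.mem_pyRange_one).mp hi
          rw [hd]
          omega
      have hge : ¬ p ≥ (15:Int) := by omega
      have hn : max 0 (min (15 : Int) (p + 1)) = 0 := by omega
      have hr0 : PySem.List.pyRange 0 0 1 = ([] : List Int) := by decide
      rw [hA]
      simp only [get_error_pattern_alt, hd, if_neg hge, hn, hr0, List.foldl_nil]
  · -- p ≥ 15: both sides are the all-black list
    have hA : get_error_pattern p = List.replicate 30 ((0:Int),(0:Int),(0:Int)) := by
      rw [pvA_eq_fold, pvFoldA_black, hlen]
      · simp
      · intro i _
        rw [hd]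
        omega
    have hge : p ≥ (15:Int) := by omega
    rw [hA]
    simp only [get_error_pattern_alt, hd, if_pos hge]
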